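-- pv_equiv track=rewrite | github.com/bufordsharkley/convoy | app.py | merge_podcast_info
-- ===== SOURCE A (Python) =====
-- def merge_podcast_info(all_info):
--     resp = {}
--     for info in all_info:
--         for k, v in info.items():
--             if k == 'episodes' and 'episodes' in resp:
--                 resp[k] = resp[k] + v
--             else:
--                 resp[k] = v
--     return resp
-- ===== SOURCE B (Python) =====
-- def merge_podcast_info(all_info):
--     resp = {}
--     for info in all_info:
--         resp.update(info)
--     if any('episodes' in info for info in all_info):
--         resp['episodes'] = [e for info in all_info if 'episodes' in info
--                             for e in info['episodes']]
--     return resp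
-- ===== Notes on version B (the rewrite author's own statement) =====
-- stated objective: simpler
-- what changed: A interleaves the episodes-accumulation with the merge inside a nested per-key loop; B first merges all dicts with plain last-wins dict.update calls, then sets 'episodes' (if any dict had it) to one flat concatenation built by a comprehension.
import Mathlib
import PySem

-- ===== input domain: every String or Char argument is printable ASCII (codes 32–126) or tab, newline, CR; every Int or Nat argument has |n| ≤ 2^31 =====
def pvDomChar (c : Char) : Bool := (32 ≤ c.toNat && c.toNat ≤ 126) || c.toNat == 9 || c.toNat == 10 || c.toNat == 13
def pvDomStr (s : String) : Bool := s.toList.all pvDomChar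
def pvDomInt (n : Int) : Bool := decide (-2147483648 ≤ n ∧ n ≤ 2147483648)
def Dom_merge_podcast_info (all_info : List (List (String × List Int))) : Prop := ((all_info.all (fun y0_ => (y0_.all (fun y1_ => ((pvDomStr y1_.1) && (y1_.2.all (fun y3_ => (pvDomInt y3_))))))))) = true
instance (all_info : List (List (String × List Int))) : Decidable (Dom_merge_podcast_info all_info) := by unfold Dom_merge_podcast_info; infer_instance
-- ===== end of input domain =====

-- B replaces A's per-key merge loop (that accumulates 'episodes' inline) by a plain
-- last-wins dict.update merge followed by a single concatenation pass for 'episodes'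
-- (objective: simpler decomposition, same cost).

-- ===== PORT A =====
def merge_podcast_info (all_info : List (List (String × List Int))) : List (String × List Int) :=
  (all_info.foldl (fun resp info =>
      (PySem.Dict.ofList info).items.foldl (fun resp kv =>
        if kv.1 == "episodes" && resp.contains "episodes" then
          resp.insert kv.1 (resp.getD kv.1 [] ++ kv.2)
        else
          resp.insert kv.1 kv.2) resp)
    PySem.Dict.empty).items

-- ===== PORT B =====
def merge_podcast_info_alt (all_info : List (List (String × List Int))) : List (String × List Int) :=
  let resp := all_info.foldl (fun d info => d.update (PySem.Dict.ofList info).items) PySem.Dict.empty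
  let resp' := if all_info.any (fun info => (PySem.Dict.ofList info).contains "episodes") then
      resp.insert "episodes"
        (all_info.flatMap (fun info =>
          if (PySem.Dict.ofList info).contains "episodes" then
            (PySem.Dict.ofList info).getD "episodes" []
          else []))
    else resp
  resp'.items

-- ===== PRECONDITION & SPEC =====
def Spec_merge_podcast_info (all_info : List (List (String × List Int))) (out : List (String × List Int)) : Prop := out = merge_podcast_info_alt all_info
instance (all_info : List (List (String × List Int))) (out : List (String × List Int)) : Decidable (Spec_merge_podcast_info all_info out) := by unfold Spec_merge_podcast_info; infer_instance

-- ===== CLAIM (what is proved, stated in full; the proofs are below) =====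
def Claim_equal_merge_podcast_info : Prop := ∀ (all_info : List (List (String × List Int))), Dom_merge_podcast_info all_info → Spec_merge_podcast_info all_info (merge_podcast_info all_info)

-- ===== LEMMAS AND PROOFS =====

-- proof-side names for the two programs' internal states
def pvStep (resp : PySem.Dict String (List Int)) (kv : String × List Int) : PySem.Dict String (List Int) :=
  if kv.1 == "episodes" && resp.contains "episodes" then
    resp.insert kv.1 (resp.getD kv.1 [] ++ kv.2)
  else
    resp.insert kv.1 kv.2

def pvPatch (d : PySem.Dict String (List Int)) (kv : String × List Int) : String × List Int :=
  if kv.1 == "episodes" && d.contains "episodes" then (kv.1, d.getD kv.1 [] ++ kv.2) else kv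

def pvA (l : List (List (String × List Int))) : PySem.Dict String (List Int) :=
  l.foldl (fun resp info => (PySem.Dict.ofList info).items.foldl pvStep resp) PySem.Dict.empty

def pvUpd (l : List (List (String × List Int))) : PySem.Dict String (List Int) :=
  l.foldl (fun d info => d.update (PySem.Dict.ofList info).items) PySem.Dict.empty

def pvAny (l : List (List (String × List Int))) : Bool :=
  l.any (fun info => (PySem.Dict.ofList info).contains "episodes")

def pvEps (l : List (List (String × List Int))) : List Int :=
  l.flatMap (fun info =>
    if (PySem.Dict.ofList info).contains "episodes" then
      (PySem.Dict.ofList info).getD "episodes" []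
    else [])

def pvB (l : List (List (String × List Int))) : PySem.Dict String (List Int) :=
  if pvAny l then (pvUpd l).insert "episodes" (pvEps l) else pvUpd l

lemma pvA_eq (l : List (List (String × List Int))) : merge_podcast_info l = (pvA l).items := rfl

lemma pvB_eq (l : List (List (String × List Int))) : merge_podcast_info_alt l = (pvB l).items := rfl

lemma pvStep_eq (d : PySem.Dict String (List Int)) (kv : String × List Int) :
    pvStep d kv = d.insert (pvPatch d kv).1 (pvPatch d kv).2 := by
  unfold pvStep pvPatch
  split <;> rfl

lemma pv_contains_update (ps : List (String × List Int)) (d : PySem.Dict String (List Int)) (k : String) :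
    (d.update ps).contains k = (d.contains k || ps.any (fun p => p.1 == k)) := by
  induction ps generalizing d with
  | nil => simp [PySem.Dict.update]
  | cons p ps ih =>
    show ((d.insert p.1 p.2).update ps).contains k = _
    rw [ih, PySem.Dict.contains_insert]
    simp [Bool.or_assoc, Bool.or_left_comm, BEq.comm]

lemma pv_get?_update_nomem (ps : List (String × List Int)) (d : PySem.Dict String (List Int)) (k : String)
    (h : ∀ p ∈ ps, (p.1 == k) = false) : (d.update ps).get? k = d.get? k := by
  induction ps generalizing d with
  | nil => rfl
  | cons p ps ih =>
    show ((d.insert p.1 p.2).update ps).get? k = _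
    rw [ih _ (fun q hq => h q (List.mem_cons_of_mem _ hq))]
    exact PySem.Dict.get?_insert_of_ne _ _ (Ne.symm (by simpa using h p List.mem_cons_self))

lemma pv_insert_same (d : PySem.Dict String (List Int)) (k : String) (v : List Int)
    (hnd : d.keys.Nodup) (h : d.get? k = some v) : d.insert k v = d := by
  have hc : d.contains k = true := by rw [PySem.Dict.contains_eq_isSome_get?, h]; rfl
  apply PySem.Dict.ext
  rw [PySem.Dict.items_insert_of_contains _ _ hc]
  have hpt : ∀ p ∈ d.items, (if (p.1 == k) = true then (k, v) else p) = p := by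
    intro p hp
    by_cases hpk : (p.1 == k) = true
    · have hk : p.1 = k := by simpa using hpk
      have h2 := PySem.Dict.get?_of_mem_items d (k := p.1) (v := p.2) (by simpa using hp) hnd
      rw [hk, h] at h2
      have hv : v = p.2 := by injection h2
      simp only [hpk, if_true]
      rw [← hk, hv]
    · simp [hpk]
  exact (List.map_congr_left hpt).trans (List.map_id' _)

lemma pv_insert_comm (d : PySem.Dict String (List Int)) (k k' : String) (e v' : List Int)
    (hc : d.contains k = true) (hk : (k' == k) = false) :
    (d.insert k e).insert k' v' = (d.insert k' v').insert k e := by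
  have hk' : k' ≠ k := by simpa using hk
  have hkk' : (k == k') = false := by simpa using Ne.symm hk'
  have hck : (d.insert k' v').contains k = true := by
    rw [PySem.Dict.contains_insert]; simp [hc]
  apply PySem.Dict.ext
  by_cases hc' : d.contains k' = true
  · have hck' : (d.insert k e).contains k' = true := by
      rw [PySem.Dict.contains_insert]; simp [hc']
    rw [PySem.Dict.items_insert_of_contains _ _ hck', PySem.Dict.items_insert_of_contains _ _ hc,
        PySem.Dict.items_insert_of_contains _ _ hck, PySem.Dict.items_insert_of_contains _ _ hc']
    simp only [List.map_map]
    apply List.map_congr_left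
    intro p _
    simp only [Function.comp_apply]
    by_cases h1 : p.1 = k
    · have e1 : (p.1 == k) = true := by simpa using h1
      have e2 : (p.1 == k') = false := by simpa using (h1 ▸ fun hcontra => hk' (hcontra ▸ rfl) : ¬ p.1 = k')
      simp [e1, e2, hkk']
    · by_cases h2 : p.1 = k'
      · have e2 : (p.1 == k') = true := by simpa using h2
        have e1 : (p.1 == k) = false := by simpa using h1
        simp [e1, e2, hk]
      · have e1 : (p.1 == k) = false := by simpa using h1
        have e2 : (p.1 == k') = false := by simpa using h2
        simp [e1, e2]
  · have hc'' : d.contains k' = false := by simpa using hc'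
    have hck' : (d.insert k e).contains k' = false := by
      rw [PySem.Dict.contains_insert]; simp [hk, hc'']
    rw [PySem.Dict.items_insert_of_not_contains _ _ hck', PySem.Dict.items_insert_of_contains _ _ hc,
        PySem.Dict.items_insert_of_contains _ _ hck,
        PySem.Dict.items_insert_of_not_contains _ _ hc'']
    rw [List.map_append]
    simp [beq_iff_eq, hk']

lemma pv_insert_update_comm (ps : List (String × List Int)) (d : PySem.Dict String (List Int))
    (k : String) (e : List Int) (hc : d.contains k = true)
    (hne : ∀ p ∈ ps, (p.1 == k) = false) :
    (d.insert k e).update ps = (d.update ps).insert k e := by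
  induction ps generalizing d with
  | nil => rfl
  | cons p ps ih =>
    show ((d.insert k e).insert p.1 p.2).update ps = ((d.insert p.1 p.2).update ps).insert k e
    rw [pv_insert_comm d k p.1 e p.2 hc (hne p List.mem_cons_self)]
    exact ih (d.insert p.1 p.2)
      (by rw [PySem.Dict.contains_insert]; simp [hc])
      (fun q hq => hne q (List.mem_cons_of_mem _ hq))

lemma pv_update_append (d : PySem.Dict String (List Int)) (xs ys : List (String × List Int)) :
    d.update (xs ++ ys) = (d.update xs).update ys := by
  simp [PySem.Dict.update, List.foldl_append]

lemma pv_inner (ps : List (String × List Int)) (d : PySem.Dict String (List Int))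
    (hnd : (ps.map Prod.fst).Nodup) :
    ps.foldl pvStep d = d.update (ps.map (pvPatch d)) := by
  induction ps generalizing d with
  | nil => rfl
  | cons kv ps ih =>
    simp only [List.map_cons, List.foldl_cons]
    show ps.foldl pvStep (pvStep d kv) =
      (d.insert (pvPatch d kv).1 (pvPatch d kv).2).update (ps.map (pvPatch d))
    rw [← pvStep_eq]
    have hnd' : (ps.map Prod.fst).Nodup := (List.nodup_cons.mp (by simpa using hnd)).2
    have hhead : kv.1 ∉ ps.map Prod.fst := (List.nodup_cons.mp (by simpa using hnd)).1
    rw [ih (pvStep d kv) hnd']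
    congr 1
    apply List.map_congr_left
    intro p hp
    have hpk : p.1 ≠ kv.1 := fun hcontra => hhead (hcontra ▸ List.mem_map_of_mem hp)
    by_cases hk : (kv.1 == "episodes") = true
    · -- head key is "episodes": every later key differs from it, so pvPatch ignores the step
      have hke : kv.1 = "episodes" := by simpa using hk
      have hpe : (p.1 == "episodes") = false := by simp [← hke, hpk]
      unfold pvPatch
      simp [hpe]
    · -- head key is not "episodes": the inserted key never touches "episodes"
      have hstep : pvStep d kv = d.insert kv.1 kv.2 := by unfold pvStep; simp [hk]
      have hne : "episodes" ≠ kv.1 := fun hcontra => by simp [hcontra] at hk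
      have c1 : (pvStep d kv).contains "episodes" = d.contains "episodes" := by
        rw [hstep, PySem.Dict.contains_insert]
        simp [(by simpa using hne : ("episodes" == kv.1) = false)]
      have c2 : (pvStep d kv).getD "episodes" [] = d.getD "episodes" [] := by
        rw [hstep]; exact PySem.Dict.getD_insert_of_ne _ _ _ hne
      unfold pvPatch
      by_cases hpe : (p.1 == "episodes") = true
      · have hpe' : p.1 = "episodes" := by simpa using hpe
        rw [hpe', c1, c2]
      · simp [Bool.eq_false_iff.mpr hpe]

lemma pv_nodup_upd (l : List (List (String × List Int))) : (pvUpd l).keys.Nodup := by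
  have h : ∀ (l : List (List (String × List Int))) (d : PySem.Dict String (List Int)), d.keys.Nodup →
      (l.foldl (fun d info => d.update (PySem.Dict.ofList info).items) d).keys.Nodup := by
    intro l
    induction l with
    | nil => intro d h; exact h
    | cons i l ih => intro d h; exact ih _ (PySem.Dict.nodup_keys_update d _ h)
  exact h l PySem.Dict.empty (by simp [PySem.Dict.empty, PySem.Dict.keys])

lemma pv_contains_upd (l : List (List (String × List Int))) :
    (pvUpd l).contains "episodes" = pvAny l := by
  induction l using List.reverseRecOn with
  | nil => rfl
  | append_singleton l i ih =>
    have h1 : pvUpd (l ++ [i]) = (pvUpd l).update (PySem.Dict.ofList i).items := by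
      unfold pvUpd; rw [List.foldl_append]; rfl
    have h2 : pvAny (l ++ [i]) = (pvAny l || (PySem.Dict.ofList i).contains "episodes") := by
      unfold pvAny; rw [List.any_append]; simp
    rw [h1, pv_contains_update, ih, h2]; rfl

lemma pv_eps_nil (l : List (List (String × List Int))) (h : pvAny l = false) : pvEps l = [] := by
  unfold pvAny at h
  unfold pvEps
  rw [List.flatMap_eq_nil_iff]
  intro i hi
  have hc : (PySem.Dict.ofList i).contains "episodes" = false := by
    simpa using (List.any_eq_false.mp h) i hi
  simp [hc]

-- splitting a Nodup item list at its (unique) "episodes" entry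
lemma pv_split (ps : List (String × List Int)) (hnd : (ps.map Prod.fst).Nodup)
    (hc : ps.any (fun p => p.1 == "episodes") = true) :
    ∃ ps1 w ps2, ps = ps1 ++ ("episodes", w) :: ps2 ∧
      (∀ p ∈ ps1, (p.1 == "episodes") = false) ∧ (∀ p ∈ ps2, (p.1 == "episodes") = false) := by
  obtain ⟨p, hp, hpe⟩ := List.any_eq_true.mp hc
  obtain ⟨k0, w0⟩ := p
  have hpe' : k0 = "episodes" := by simpa using hpe
  subst hpe'
  obtain ⟨ps1, ps2, rfl⟩ := List.append_of_mem hp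
  rw [List.map_append, List.map_cons] at hnd
  obtain ⟨h1n, h2n, hdisj⟩ := List.nodup_append.mp hnd
  refine ⟨ps1, w0, ps2, rfl, ?_, ?_⟩
  · intro q hq
    have hne : q.1 ≠ "episodes" := fun hcontra =>
      hdisj q.1 (List.mem_map_of_mem hq) "episodes" (by simp) hcontra
    simpa using hne
  · intro q hq
    have hp2 : "episodes" ∉ ps2.map Prod.fst := (List.nodup_cons.mp h2n).1
    have hne : q.1 ≠ "episodes" := fun hcontra => hp2 (hcontra ▸ List.mem_map_of_mem hq)
    simpa using hne

lemma pv_main (l : List (List (String × List Int))) : pvA l = pvB l := by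
  induction l using List.reverseRecOn with
  | nil => rfl
  | append_singleton l i ih =>
    have hA : pvA (l ++ [i]) = (PySem.Dict.ofList i).items.foldl pvStep (pvA l) := by
      unfold pvA; rw [List.foldl_append]; rfl
    have hupd : pvUpd (l ++ [i]) = (pvUpd l).update (PySem.Dict.ofList i).items := by
      unfold pvUpd; rw [List.foldl_append]; rfl
    have hany : pvAny (l ++ [i]) = (pvAny l || (PySem.Dict.ofList i).contains "episodes") := by
      unfold pvAny; rw [List.any_append]; simp
    have heps : pvEps (l ++ [i]) = pvEps l ++
        (if (PySem.Dict.ofList i).contains "episodes" then (PySem.Dict.ofList i).getD "episodes" [] else []) := by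
      unfold pvEps; rw [List.flatMap_append]; simp
    have hnd : ((PySem.Dict.ofList i).items.map Prod.fst).Nodup := PySem.Dict.nodup_keys_ofList i
    rw [hA, ih, pv_inner _ _ hnd]
    by_cases hh : pvAny l = true
    · -- some earlier dict already provided "episodes"
      have hBl : pvB l = (pvUpd l).insert "episodes" (pvEps l) := by unfold pvB; rw [hh]; rfl
      have hcU : (pvUpd l).contains "episodes" = true := by rw [pv_contains_upd, hh]
      have hcB : (pvB l).contains "episodes" = true := by
        rw [hBl]; exact PySem.Dict.contains_insert_self _ _ _
      have hgB : (pvB l).getD "episodes" [] = pvEps l := by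
        rw [hBl]; exact PySem.Dict.getD_insert_self _ _ _ _
      by_cases hc : (PySem.Dict.ofList i).contains "episodes" = true
      · obtain ⟨ps1, w, ps2, hsplit, h1, h2⟩ := pv_split _ hnd hc
        have hw : (PySem.Dict.ofList i).get? "episodes" = some w :=
          PySem.Dict.get?_of_mem_items _ (by rw [hsplit]; simp) (PySem.Dict.nodup_keys_ofList i)
        have hwD : (PySem.Dict.ofList i).getD "episodes" [] = w := by
          rw [PySem.Dict.getD_eq_get?_getD, hw]; rfl
        have hmap : (PySem.Dict.ofList i).items.map (pvPatch (pvB l)) =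
            ps1 ++ ("episodes", pvEps l ++ w) :: ps2 := by
          rw [hsplit, List.map_append, List.map_cons]
          congr 1
          · exact (List.map_congr_left (fun q hq => by unfold pvPatch; simp [h1 q hq])).trans
              (List.map_id' _)
          congr 1
          · unfold pvPatch; simp [hcB, hgB]
          · exact (List.map_congr_left (fun q hq => by unfold pvPatch; simp [h2 q hq])).trans
              (List.map_id' _)
        have hupd1 : ∀ (d : PySem.Dict String (List Int)) (v : List Int), d.contains "episodes" = true →
            d.update (ps1 ++ ("episodes", v) :: ps2) = ((d.update ps1).update ps2).insert "episodes" v := by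
          intro d v hd
          rw [pv_update_append]
          show ((d.update ps1).insert "episodes" v).update ps2 = _
          exact pv_insert_update_comm ps2 _ _ _
            (by rw [pv_contains_update]; simp [hd]) h2
        rw [hmap, hupd1 _ _ hcB]
        -- now push the "episodes" insertion out of pvB l on the left
        have hstep1 : (pvB l).update ps1 = ((pvUpd l).update ps1).insert "episodes" (pvEps l) := by
          rw [hBl]; exact pv_insert_update_comm ps1 _ _ _ hcU h1
        have hstep2 : ((pvB l).update ps1).update ps2 =
            (((pvUpd l).update ps1).update ps2).insert "episodes" (pvEps l) := by
          rw [hstep1]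
          exact pv_insert_update_comm ps2 _ _ _ (by rw [pv_contains_update]; simp [hcU]) h2
        rw [hstep2, PySem.Dict.insert_insert_self]
        -- right-hand side
        have hrhs : pvB (l ++ [i]) =
            (((pvUpd l).update ps1).update ps2).insert "episodes" (pvEps l ++ w) := by
          unfold pvB
          rw [hany, hh, heps]
          simp only [Bool.true_or, hc, if_pos]
          rw [hwD, hupd, hsplit, hupd1 _ _ hcU, PySem.Dict.insert_insert_self]
        rw [hrhs]
      · -- the new dict has no "episodes"
        have hcf : (PySem.Dict.ofList i).contains "episodes" = false := by simpa using hc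
        have hnone : ∀ p ∈ (PySem.Dict.ofList i).items, (p.1 == "episodes") = false := by
          have := hcf
          simp only [PySem.Dict.contains] at this
          exact fun p hp => by simpa using List.any_eq_false.mp this p hp
        have hmap : (PySem.Dict.ofList i).items.map (pvPatch (pvB l)) = (PySem.Dict.ofList i).items :=
          (List.map_congr_left (fun q hq => by unfold pvPatch; simp [hnone q hq])).trans
            (List.map_id' _)
        rw [hmap, hBl, pv_insert_update_comm _ _ _ _ hcU hnone]
        unfold pvB
        rw [hany, hh, heps, hcf, hupd]
        simp
    · -- no earlier dict had "episodes"
      have hhf : pvAny l = false := by simpa using hh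
      have hBl : pvB l = pvUpd l := by unfold pvB; rw [hhf]; rfl
      have hcUf : (pvUpd l).contains "episodes" = false := by rw [pv_contains_upd, hhf]
      have hcBf : (pvB l).contains "episodes" = false := by rw [hBl]; exact hcUf
      have hmap : (PySem.Dict.ofList i).items.map (pvPatch (pvB l)) = (PySem.Dict.ofList i).items :=
        (List.map_congr_left (fun q _ => by unfold pvPatch; simp [hcBf])).trans (List.map_id' _)
      rw [hmap, hBl]
      by_cases hc : (PySem.Dict.ofList i).contains "episodes" = true
      · obtain ⟨ps1, w, ps2, hsplit, h1, h2⟩ := pv_split _ hnd hc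
        have hw : (PySem.Dict.ofList i).get? "episodes" = some w :=
          PySem.Dict.get?_of_mem_items _ (by rw [hsplit]; simp) (PySem.Dict.nodup_keys_ofList i)
        have hwD : (PySem.Dict.ofList i).getD "episodes" [] = w := by
          rw [PySem.Dict.getD_eq_get?_getD, hw]; rfl
        have hget : ((pvUpd l).update (PySem.Dict.ofList i).items).get? "episodes" = some w := by
          rw [hsplit, pv_update_append]
          show ((((pvUpd l).update ps1).insert "episodes" w).update ps2).get? "episodes" = _
          rw [pv_get?_update_nomem _ _ _ h2]
          exact PySem.Dict.get?_insert_self _ _ _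
        have hins : ((pvUpd l).update (PySem.Dict.ofList i).items).insert "episodes" w =
            (pvUpd l).update (PySem.Dict.ofList i).items :=
          pv_insert_same _ _ _ (PySem.Dict.nodup_keys_update _ _ (pv_nodup_upd l)) hget
        unfold pvB
        rw [hany, hhf, heps, hc]
        simp only [Bool.false_or, if_true, hupd]
        rw [pv_eps_nil l hhf, hwD]
        simpa using hins.symm
      · have hcf : (PySem.Dict.ofList i).contains "episodes" = false := by simpa using hc
        unfold pvB
        rw [hany, hhf, hcf, hupd]
        rfl

-- ===== VERDICT (by name: the statement is the Claim_ definition above) =====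
theorem merge_podcast_info_spec : Claim_equal_merge_podcast_info := by
  intro l _
  show merge_podcast_info l = merge_podcast_info_alt l
  rw [pvA_eq, pvB_eq, pv_main]
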